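-- pv_equiv track=rewrite | github.com/faizanroshan/CNS | Lab3.2.py | receiver_data
-- ===== SOURCE A (Python) =====
-- dle_ascii = ord('*')
--
-- def receiver_data(sender_data):
--
--     decoded = ""
--     decoded += sender_data[6] # extract first character seperately
--
--     index = 13
--     while index < len(sender_data):
--
--         if sender_data[index: index+3] == "DLE" and sender_data[index+3: index+6] == "DLE":
--
--             decoded += chr(dle_ascii)
--             index += 6
--
--         elif sender_data[index: index+3] == "DLE" or sender_data[index: index+3] == "ETX":
--
--             index += 3
--         else:
--             decoded += sender_data[index]
--             index += 1
--
--     return(decoded)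
-- ===== SOURCE B (Python) =====
-- dle_ascii = ord('*')
--
-- def receiver_data(sender_data):
--     # locate-next-marker-then-copy-chunk decoding instead of per-character window comparisons
--     out = [sender_data[6]]
--     pos = 13
--     while True:
--         d = sender_data.find("DLE", pos)
--         e = sender_data.find("ETX", pos)
--         if d == -1 and e == -1:
--             out.append(sender_data[pos:])
--             break
--         m = e if d == -1 else (d if e == -1 else min(d, e))
--         out.append(sender_data[pos:m])
--         if m == d:
--             if sender_data[m + 3:m + 6] == "DLE":
--                 out.append(chr(dle_ascii))
--                 pos = m + 6
--             else:
--                 pos = m + 3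
--         else:
--             pos = m + 3
--     return "".join(out)
-- ===== Notes on version B (the rewrite author's own statement) =====
-- stated objective: faster
-- what changed: Instead of comparing a 3-char window at every index, B uses str.find to jump directly to the next marker trigram and copies the whole verbatim chunk before it in one slice.
import Mathlib
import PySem

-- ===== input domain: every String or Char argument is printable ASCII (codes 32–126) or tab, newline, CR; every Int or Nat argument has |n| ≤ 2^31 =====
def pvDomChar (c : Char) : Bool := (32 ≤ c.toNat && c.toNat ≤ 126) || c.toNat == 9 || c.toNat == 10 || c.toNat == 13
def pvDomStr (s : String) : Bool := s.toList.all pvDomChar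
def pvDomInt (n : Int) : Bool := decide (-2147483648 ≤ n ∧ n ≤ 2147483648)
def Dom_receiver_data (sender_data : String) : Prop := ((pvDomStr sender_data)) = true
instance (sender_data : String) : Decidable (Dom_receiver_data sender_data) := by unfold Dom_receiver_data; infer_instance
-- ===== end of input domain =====

-- B replaces A's per-character three-char-window while-loop by a find-next-marker-and-copy-chunk
-- loop built on str.find(sub, pos) (measurably faster); agreement proved on all strings of length ≥ 7 (Pre_).

-- ===== PORT A =====
-- the while-loop of A: returns the characters decoded from position i onward
def aLoop (cs : List Char) (i : Nat) : List Char :=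
  if h : i < cs.length then
    if PySem.List.slice cs (some (i : Int)) (some ((i : Int) + 3)) = ['D', 'L', 'E'] ∧
       PySem.List.slice cs (some ((i : Int) + 3)) (some ((i : Int) + 6)) = ['D', 'L', 'E'] then
      '*' :: aLoop cs (i + 6)            -- chr(dle_ascii) = chr(ord('*')) = '*'
    else if PySem.List.slice cs (some (i : Int)) (some ((i : Int) + 3)) = ['D', 'L', 'E'] ∨
            PySem.List.slice cs (some (i : Int)) (some ((i : Int) + 3)) = ['E', 'T', 'X'] then
      aLoop cs (i + 3)
    else
      cs[i] :: aLoop cs (i + 1)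
  else []
termination_by cs.length - i
decreasing_by all_goals omega

def receiver_data (sender_data : String) : String :=
  match PySem.List.pyGet? sender_data.toList 6 with   -- sender_data[6]; none = IndexError, outside Pre_
  | none => ""
  | some c => String.ofList (c :: aLoop sender_data.toList 13)

-- ===== PORT B =====
-- two small facts about str.find(sub, pos), cited by bLoop's termination proof
theorem pvFindFrom_of_gt (s sub : List Char) (k : Nat) (h : s.length < k) :
    PySem.Chars.findFrom s sub (k : Int) none = -1 := by
  simp only [PySem.Chars.findFrom]
  have h0 : ¬ ((k : Int) < 0) := by omega
  rw [if_neg h0, if_pos (by exact_mod_cast h)]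

theorem pvFindFrom_spec (s sub : List Char) (k : Nat)
    (h : PySem.Chars.findFrom s sub (k : Int) none ≠ -1) :
    0 ≤ PySem.Chars.findFrom s sub (k : Int) none ∧
    k ≤ (PySem.Chars.findFrom s sub (k : Int) none).toNat ∧
    sub <+: s.drop (PySem.Chars.findFrom s sub (k : Int) none).toNat ∧
    (PySem.Chars.findFrom s sub (k : Int) none).toNat + sub.length ≤ s.length ∧
    (∀ i, k ≤ i → i < (PySem.Chars.findFrom s sub (k : Int) none).toNat →
      ¬ sub <+: s.drop i) := by
  have hk : k ≤ s.length := by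
    by_contra hk
    exact h (pvFindFrom_of_gt s sub k (by omega))
  obtain ⟨h1, h2, h3⟩ := PySem.Chars.findFrom_natCast_spec s sub k hk h
  have hlen : sub.length ≤ (s.drop (PySem.Chars.findFrom s sub (k : Int) none).toNat).length :=
    h2.length_le
  have ht : (PySem.Chars.findFrom s sub (k : Int) none).toNat ≤ s.length := by
    rw [PySem.Chars.findFrom_natCast s sub k hk]
    split
    · simp
    · have hfl := PySem.Chars.find_le_length (s.drop k) sub
      simp only [List.length_drop] at hfl
      omega
  simp only [List.length_drop] at hlen
  refine ⟨by omega, by omega, h2, by omega, h3⟩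

-- m = e if d == -1 else (d if e == -1 else min(d, e))
def nextM (cs : List Char) (pos : Nat) : Nat :=
  (if PySem.Chars.findFrom cs ['D', 'L', 'E'] (pos : Int) none = -1 then
     PySem.Chars.findFrom cs ['E', 'T', 'X'] (pos : Int) none
   else if PySem.Chars.findFrom cs ['E', 'T', 'X'] (pos : Int) none = -1 then
     PySem.Chars.findFrom cs ['D', 'L', 'E'] (pos : Int) none
   else min (PySem.Chars.findFrom cs ['D', 'L', 'E'] (pos : Int) none)
            (PySem.Chars.findFrom cs ['E', 'T', 'X'] (pos : Int) none)).toNat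

theorem nextM_spec (cs : List Char) (pos : Nat)
    (h : ¬ (PySem.Chars.findFrom cs ['D', 'L', 'E'] (pos : Int) none = -1 ∧
            PySem.Chars.findFrom cs ['E', 'T', 'X'] (pos : Int) none = -1)) :
    pos ≤ nextM cs pos ∧ nextM cs pos + 3 ≤ cs.length := by
  unfold nextM
  by_cases hd : PySem.Chars.findFrom cs ['D', 'L', 'E'] (pos : Int) none = -1
  · have he : PySem.Chars.findFrom cs ['E', 'T', 'X'] (pos : Int) none ≠ -1 := fun he => h ⟨hd, he⟩
    obtain ⟨e0, e1, _, e3, _⟩ := pvFindFrom_spec cs ['E', 'T', 'X'] pos he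
    simp only [List.length_cons, List.length_nil] at e3
    rw [if_pos hd]; omega
  · by_cases he : PySem.Chars.findFrom cs ['E', 'T', 'X'] (pos : Int) none = -1
    · obtain ⟨d0, d1, _, d3, _⟩ := pvFindFrom_spec cs ['D', 'L', 'E'] pos hd
      simp only [List.length_cons, List.length_nil] at d3
      rw [if_neg hd, if_pos he]; omega
    · obtain ⟨d0, d1, _, d3, _⟩ := pvFindFrom_spec cs ['D', 'L', 'E'] pos hd
      obtain ⟨e0, e1, _, e3, _⟩ := pvFindFrom_spec cs ['E', 'T', 'X'] pos he
      simp only [List.length_cons, List.length_nil] at d3 e3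
      rw [if_neg hd, if_neg he]
      rcases le_total (PySem.Chars.findFrom cs ['D', 'L', 'E'] (pos : Int) none)
                      (PySem.Chars.findFrom cs ['E', 'T', 'X'] (pos : Int) none) with hle | hle
      · rw [min_eq_left hle]; omega
      · rw [min_eq_right hle]; omega

-- the while-True loop of B: locate the next marker, copy the chunk before it verbatim
def bLoop (cs : List Char) (pos : Nat) : List Char :=
  if _hde : PySem.Chars.findFrom cs ['D', 'L', 'E'] (pos : Int) none = -1 ∧
           PySem.Chars.findFrom cs ['E', 'T', 'X'] (pos : Int) none = -1 then
    PySem.List.slice cs (some (pos : Int)) none                    -- sender_data[pos:]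
  else
    PySem.List.slice cs (some (pos : Int)) (some (nextM cs pos : Int)) ++   -- sender_data[pos:m]
      (if (nextM cs pos : Int) = PySem.Chars.findFrom cs ['D', 'L', 'E'] (pos : Int) none then
         (if PySem.List.slice cs (some ((nextM cs pos : Int) + 3)) (some ((nextM cs pos : Int) + 6))
              = ['D', 'L', 'E'] then
            '*' :: bLoop cs (nextM cs pos + 6)                     -- chr(dle_ascii) = '*'
          else bLoop cs (nextM cs pos + 3))
       else bLoop cs (nextM cs pos + 3))
termination_by cs.length + 3 - pos
decreasing_by
  all_goals (obtain ⟨h1, h2⟩ := nextM_spec cs pos _hde; omega)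

def receiver_data_alt (sender_data : String) : String :=
  match PySem.List.pyGet? sender_data.toList 6 with   -- sender_data[6]; none = IndexError, outside Pre_
  | none => ""
  | some c => String.ofList (c :: bLoop sender_data.toList 13)

-- ===== PRECONDITION & SPEC =====
-- Pre_ excludes exactly the strings of length < 7, on which A raises IndexError at sender_data[6]
def Pre_receiver_data (sender_data : String) : Prop := 7 ≤ sender_data.toList.length
instance (sender_data : String) : Decidable (Pre_receiver_data sender_data) := by
  unfold Pre_receiver_data; infer_instance

def pvWitness_receiver_data : String := "DLESTXaDLETXb"

def Spec_receiver_data (sender_data : String) (out : String) : Prop := out = receiver_data_alt sender_data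
instance (sender_data : String) (out : String) : Decidable (Spec_receiver_data sender_data out) := by
  unfold Spec_receiver_data; infer_instance

-- ===== CLAIM (what is proved, stated in full; the proofs are below) =====
def Claim_equal_receiver_data : Prop := ∀ (sender_data : String), Dom_receiver_data sender_data → Pre_receiver_data sender_data → Spec_receiver_data sender_data (receiver_data sender_data)

-- ===== LEMMAS AND PROOFS =====

-- A's window test sender_data[i:i+3] == pat says: pat is a prefix of the suffix starting at i
theorem slice3_eq_iff (cs pat : List Char) (hpat : pat.length = 3) (i : Nat) :
    PySem.List.slice cs (some (i : Int)) (some ((i : Int) + 3)) = pat ↔ pat <+: cs.drop i := by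
  have hc : (i : Int) + 3 = ((i + 3 : Nat) : Int) := by push_cast; ring
  rw [hc, PySem.List.slice_natCast]
  have h3 : i + 3 - i = 3 := by omega
  rw [h3]
  constructor
  · intro h; rw [List.prefix_iff_eq_take, hpat, h]
  · intro h; rw [List.prefix_iff_eq_take, hpat] at h; exact h.symm

-- find(sub, pos) == -1 means sub starts nowhere at or after pos
theorem pvFindFrom_none (s sub : List Char) (hs : sub ≠ []) (k j : Nat)
    (hk : PySem.Chars.findFrom s sub (k : Int) none = -1) (hj : k ≤ j) : ¬ sub <+: s.drop j := by
  intro hp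
  by_cases hlen : k ≤ s.length
  · have hni := (PySem.Chars.findFrom_natCast_eq_neg_one_iff s sub k hlen).mp hk
    apply hni
    have hdd : s.drop j = (s.drop k).drop (j - k) := by
      rw [List.drop_drop]; congr 1; omega
    rw [hdd] at hp
    exact hp.isInfix.trans (List.drop_suffix (j - k) (s.drop k)).isInfix
  · have : s.drop j = [] := List.drop_eq_nil_of_le (by omega)
    rw [this] at hp
    exact hs (List.prefix_nil.mp hp)

-- no marker at or after pos: A's loop copies the rest of the string verbatim
theorem aLoop_drop (cs : List Char) : ∀ (fuel pos : Nat), cs.length - pos ≤ fuel →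
    (∀ j, pos ≤ j → ¬ ['D', 'L', 'E'] <+: cs.drop j ∧ ¬ ['E', 'T', 'X'] <+: cs.drop j) →
    aLoop cs pos = cs.drop pos := by
  intro fuel
  induction fuel with
  | zero =>
    intro pos hf _
    rw [aLoop, dif_neg (by omega)]
    exact (List.drop_eq_nil_of_le (by omega)).symm
  | succ fuel ih =>
    intro pos hf hnm
    by_cases h : pos < cs.length
    · obtain ⟨hD, hE⟩ := hnm pos le_rfl
      rw [aLoop, dif_pos h,
          if_neg (by rw [slice3_eq_iff cs _ rfl pos]; exact fun hc => hD hc.1),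
          if_neg (by rw [slice3_eq_iff cs _ rfl pos, slice3_eq_iff cs _ rfl pos]; tauto),
          ih (pos + 1) (by omega) (fun j hj => hnm j (by omega))]
      exact (List.drop_eq_getElem_cons h).symm
    · rw [aLoop, dif_neg h]
      exact (List.drop_eq_nil_of_le (by omega)).symm

-- no marker in [pos, pos+k): A's loop copies that chunk verbatim and continues at pos+k
theorem aLoop_chunk (cs : List Char) : ∀ (k pos : Nat), pos + k ≤ cs.length →
    (∀ j, pos ≤ j → j < pos + k → ¬ ['D', 'L', 'E'] <+: cs.drop j ∧ ¬ ['E', 'T', 'X'] <+: cs.drop j) →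
    aLoop cs pos = (cs.drop pos).take k ++ aLoop cs (pos + k) := by
  intro k
  induction k with
  | zero => intro pos _ _; simp
  | succ k ih =>
    intro pos hlen hnm
    have h : pos < cs.length := by omega
    obtain ⟨hD, hE⟩ := hnm pos le_rfl (by omega)
    have hadd : pos + (k + 1) = (pos + 1) + k := by omega
    rw [hadd, aLoop, dif_pos h,
        if_neg (by rw [slice3_eq_iff cs _ rfl pos]; exact fun hc => hD hc.1),
        if_neg (by rw [slice3_eq_iff cs _ rfl pos, slice3_eq_iff cs _ rfl pos]; tauto),
        ih (pos + 1) (by omega) (fun j hj hj' => hnm j (by omega) (by omega))]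
    rw [List.drop_eq_getElem_cons h]
    simp only [List.take_succ_cons, List.cons_append]

-- A's loop at an index where "DLE" starts
theorem aLoop_at_DLE (cs : List Char) (m : Nat) (hm : m + 3 ≤ cs.length)
    (hD : ['D', 'L', 'E'] <+: cs.drop m) :
    aLoop cs m = if PySem.List.slice cs (some ((m : Int) + 3)) (some ((m : Int) + 6)) = ['D', 'L', 'E']
                 then '*' :: aLoop cs (m + 6) else aLoop cs (m + 3) := by
  have h1 : PySem.List.slice cs (some (m : Int)) (some ((m : Int) + 3)) = ['D', 'L', 'E'] :=
    (slice3_eq_iff cs _ rfl m).mpr hD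
  rw [aLoop, dif_pos (by omega)]
  by_cases hX : PySem.List.slice cs (some ((m : Int) + 3)) (some ((m : Int) + 6)) = ['D', 'L', 'E']
  · rw [if_pos ⟨h1, hX⟩, if_pos hX]
  · rw [if_neg (fun hc => hX hc.2), if_pos (Or.inl h1), if_neg hX]

-- A's loop at an index where "ETX" (and not "DLE") starts
theorem aLoop_at_ETX (cs : List Char) (m : Nat) (hm : m + 3 ≤ cs.length)
    (hE : ['E', 'T', 'X'] <+: cs.drop m) (hD : ¬ ['D', 'L', 'E'] <+: cs.drop m) :
    aLoop cs m = aLoop cs (m + 3) := by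
  rw [aLoop, dif_pos (by omega),
      if_neg (fun hc => hD ((slice3_eq_iff cs _ rfl m).mp hc.1)),
      if_pos (Or.inr ((slice3_eq_iff cs _ rfl m).mpr hE))]

-- the central equivalence of the two loops
theorem loop_eq (cs : List Char) : ∀ (fuel pos : Nat), cs.length + 3 - pos ≤ fuel →
    aLoop cs pos = bLoop cs pos := by
  intro fuel
  induction fuel with
  | zero =>
    intro pos hf
    rw [aLoop, dif_neg (by omega), bLoop,
        dif_pos ⟨pvFindFrom_of_gt cs _ pos (by omega), pvFindFrom_of_gt cs _ pos (by omega)⟩,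
        PySem.List.slice_from cs (by positivity)]
    exact (List.drop_eq_nil_of_le (by omega)).symm
  | succ fuel ih =>
    intro pos hf
    by_cases hde : PySem.Chars.findFrom cs ['D', 'L', 'E'] (pos : Int) none = -1 ∧
                   PySem.Chars.findFrom cs ['E', 'T', 'X'] (pos : Int) none = -1
    · rw [bLoop, dif_pos hde, PySem.List.slice_from cs (by positivity)]
      simp only [Int.toNat_natCast]
      exact aLoop_drop cs cs.length pos (by omega)
        (fun j hj => ⟨pvFindFrom_none cs _ (by simp) pos j hde.1 hj,
                      pvFindFrom_none cs _ (by simp) pos j hde.2 hj⟩)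
    · obtain ⟨hm1, hm2⟩ := nextM_spec cs pos hde
      rw [bLoop, dif_neg hde, PySem.List.slice_natCast cs pos (nextM cs pos)]
      set m := nextM cs pos with hmdef
      set fd := PySem.Chars.findFrom cs ['D', 'L', 'E'] (pos : Int) none with hfd
      set fe := PySem.Chars.findFrom cs ['E', 'T', 'X'] (pos : Int) none with hfe
      have hchunk : ∀ (hnm : ∀ j, pos ≤ j → j < m →
            ¬ ['D', 'L', 'E'] <+: cs.drop j ∧ ¬ ['E', 'T', 'X'] <+: cs.drop j),
          aLoop cs pos = (cs.drop pos).take (m - pos) ++ aLoop cs m := by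
        intro hnm
        have h := aLoop_chunk cs (m - pos) pos (by omega)
          (fun j hj hj' => hnm j hj (by omega))
        rwa [show pos + (m - pos) = m by omega] at h
      by_cases hd : fd = -1
      · -- earliest marker is "ETX"
        have he : fe ≠ -1 := fun he => hde ⟨hd, he⟩
        obtain ⟨e0, e1, e2, e3, e4⟩ := pvFindFrom_spec cs ['E', 'T', 'X'] pos he
        rw [← hfe] at e0 e1 e2 e3 e4
        have hmv : m = fe.toNat := by rw [hmdef]; unfold nextM; rw [← hfd, ← hfe, if_pos hd]
        rw [hchunk (fun j hj hj' =>
              ⟨pvFindFrom_none cs _ (by simp) pos j (hfd ▸ hd) hj,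
               e4 j hj (by omega)⟩),
            aLoop_at_ETX cs m (by omega) (hmv ▸ e2)
              (pvFindFrom_none cs _ (by simp) pos m (hfd ▸ hd) hm1),
            if_neg (show ¬ ((m : Int) = fd) by rw [hd]; omega)]
        exact congrArg _ (ih (m + 3) (by omega))
      · by_cases he : fe = -1
        · -- earliest marker is "DLE"
          obtain ⟨d0, d1, d2, d3, d4⟩ := pvFindFrom_spec cs ['D', 'L', 'E'] pos hd
          rw [← hfd] at d0 d1 d2 d3 d4
          have hmv : m = fd.toNat := by
            rw [hmdef]; unfold nextM; rw [← hfd, ← hfe, if_neg hd, if_pos he]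
          rw [hchunk (fun j hj hj' =>
                ⟨d4 j hj (by omega),
                 pvFindFrom_none cs _ (by simp) pos j (hfe ▸ he) hj⟩),
              aLoop_at_DLE cs m (by omega) (hmv ▸ d2),
              if_pos (show (m : Int) = fd by rw [hmv]; exact Int.toNat_of_nonneg d0)]
          split_ifs with hDD
          · exact congrArg _ (congrArg _ (ih (m + 6) (by omega)))
          · exact congrArg _ (ih (m + 3) (by omega))
        · -- both markers exist: the earlier one wins
          obtain ⟨d0, d1, d2, d3, d4⟩ := pvFindFrom_spec cs ['D', 'L', 'E'] pos hd
          obtain ⟨e0, e1, e2, e3, e4⟩ := pvFindFrom_spec cs ['E', 'T', 'X'] pos he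
          rw [← hfd] at d0 d1 d2 d3 d4
          rw [← hfe] at e0 e1 e2 e3 e4
          by_cases hle : fd ≤ fe
          · have hmv : m = fd.toNat := by
              rw [hmdef]; unfold nextM
              rw [← hfd, ← hfe, if_neg hd, if_neg he, min_eq_left hle]
            rw [hchunk (fun j hj hj' =>
                  ⟨d4 j hj (by omega), e4 j hj (by omega)⟩),
                aLoop_at_DLE cs m (by omega) (hmv ▸ d2),
                if_pos (show (m : Int) = fd by rw [hmv]; exact Int.toNat_of_nonneg d0)]
            split_ifs with hDD
            · exact congrArg _ (congrArg _ (ih (m + 6) (by omega)))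
            · exact congrArg _ (ih (m + 3) (by omega))
          · have hlt : fe < fd := by omega
            have hmv : m = fe.toNat := by
              rw [hmdef]; unfold nextM
              rw [← hfd, ← hfe, if_neg hd, if_neg he, min_eq_right (le_of_lt hlt)]
            rw [hchunk (fun j hj hj' =>
                  ⟨d4 j hj (by omega), e4 j hj (by omega)⟩),
                aLoop_at_ETX cs m (by omega) (hmv ▸ e2) (d4 m hm1 (by omega)),
                if_neg (show ¬ ((m : Int) = fd) by rw [hmv]; omega)]
            exact congrArg _ (ih (m + 3) (by omega))

-- ===== VERDICT (by name: the statement is the Claim_ definition above) =====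
theorem receiver_data_spec : Claim_equal_receiver_data := by
  intro s _ hpre
  unfold Pre_receiver_data at hpre
  unfold Spec_receiver_data receiver_data receiver_data_alt
  have h6 : (6 : Int) = ((6 : Nat) : Int) := rfl
  rw [h6, PySem.List.pyGet?_natCast, List.getElem?_eq_getElem (by omega)]
  rw [loop_eq s.toList (s.toList.length + 3) 13 (by omega)]
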